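-- pv_equiv track=rewrite | github.com/Himalaw/flexible_jobshop | CODE/scheduling.py | calculate_standby_time
-- ===== SOURCE A (Python) =====
-- def calculate_standby_time(results_by_machine, cmax):
--     standby_times = []
--     for machine_results in results_by_machine:
--         if not machine_results:
--             standby_times.append(cmax)
--         else:
--             total_standby = machine_results[0][5]
--             for i in range(len(machine_results) - 1):
--                 total_standby += machine_results[i + 1][5] - machine_results[i][6]
--             total_standby += cmax - machine_results[-1][6]
--             standby_times.append(total_standby)
--     return standby_times
-- ===== SOURCE B (Python) =====
-- def calculate_standby_time(results_by_machine, cmax):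
--     # Gap sums telescope: standby = cmax - total busy time on the machine.
--     return [cmax - sum(job[6] - job[5] for job in machine)
--             for machine in results_by_machine]
-- ===== Notes on version B (the rewrite author's own statement) =====
-- stated objective: simpler
-- what changed: Replaced the indexed gap-accumulation loop (first start + pairwise gaps + tail gap) by the telescoped closed form cmax minus the sum of per-job durations (job[6]-job[5]), one comprehension with no indexing.
import Mathlib
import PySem

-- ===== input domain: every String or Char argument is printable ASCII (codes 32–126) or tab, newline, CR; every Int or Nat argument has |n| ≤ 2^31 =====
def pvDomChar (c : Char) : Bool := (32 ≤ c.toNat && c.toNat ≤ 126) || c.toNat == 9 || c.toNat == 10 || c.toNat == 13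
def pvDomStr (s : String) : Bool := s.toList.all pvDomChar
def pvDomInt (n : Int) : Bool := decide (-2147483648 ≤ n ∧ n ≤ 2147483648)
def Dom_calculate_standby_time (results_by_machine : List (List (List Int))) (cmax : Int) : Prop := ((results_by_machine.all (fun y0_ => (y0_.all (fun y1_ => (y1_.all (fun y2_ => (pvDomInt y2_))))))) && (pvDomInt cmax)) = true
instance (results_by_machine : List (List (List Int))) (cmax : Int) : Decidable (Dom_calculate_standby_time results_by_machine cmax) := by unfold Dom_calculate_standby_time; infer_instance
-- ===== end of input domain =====

-- B replaces A's indexed gap-accumulation loop by the telescoped closed form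
-- cmax - sum of per-job durations (job[6] - job[5]); simpler, same cost.

-- ===== PORT A =====
def calculate_standby_time (results_by_machine : List (List (List Int))) (cmax : Int) : List Int :=
  results_by_machine.foldl (fun standby_times machine_results =>
    if machine_results = [] then
      standby_times ++ [cmax]
    else
      let total0 : Int := PySem.List.pyGetD (PySem.List.pyGetD machine_results 0 []) 5 0
      let total1 : Int :=
        (PySem.List.pyRange 0 ((machine_results.length : Int) - 1) 1).foldl
          (fun t i => t + (PySem.List.pyGetD (PySem.List.pyGetD machine_results (i + 1) []) 5 0
                           - PySem.List.pyGetD (PySem.List.pyGetD machine_results i []) 6 0)) total0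
      let total2 : Int := total1 + (cmax - PySem.List.pyGetD (PySem.List.pyGetD machine_results (-1) []) 6 0)
      standby_times ++ [total2]) []

-- ===== PORT B =====
def calculate_standby_time_alt (results_by_machine : List (List (List Int))) (cmax : Int) : List Int :=
  results_by_machine.map (fun machine =>
    cmax - (machine.map (fun job => PySem.List.pyGetD job 6 0 - PySem.List.pyGetD job 5 0)).sum)

-- ===== PRECONDITION & SPEC =====
-- A indexes job[5] and job[6]; a job with fewer than 7 entries raises IndexError in A.
def Pre_calculate_standby_time (results_by_machine : List (List (List Int))) (cmax : Int) : Prop :=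
  ∀ machine ∈ results_by_machine, ∀ job ∈ machine, 7 ≤ job.length

instance (results_by_machine : List (List (List Int))) (cmax : Int) : Decidable (Pre_calculate_standby_time results_by_machine cmax) := by
  unfold Pre_calculate_standby_time; infer_instance

def pvWitness_calculate_standby_time : List (List (List Int)) × Int :=
  ([[[0, 0, 0, 0, 0, 1, 3]], []], 5)

def Spec_calculate_standby_time (results_by_machine : List (List (List Int))) (cmax : Int) (out : List Int) : Prop := out = calculate_standby_time_alt results_by_machine cmax
instance (results_by_machine : List (List (List Int))) (cmax : Int) (out : List Int) : Decidable (Spec_calculate_standby_time results_by_machine cmax out) := by unfold Spec_calculate_standby_time; infer_instance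

-- ===== CLAIM (what is proved, stated in full; the proofs are below) =====
def Claim_equal_calculate_standby_time : Prop := ∀ (results_by_machine : List (List (List Int))) (cmax : Int), Dom_calculate_standby_time results_by_machine cmax → Pre_calculate_standby_time results_by_machine cmax → Spec_calculate_standby_time results_by_machine cmax (calculate_standby_time results_by_machine cmax)

-- ===== LEMMAS AND PROOFS =====

-- telescoping of the inner index loop, for arbitrary index functions
theorem pv_tele (g5 g6 : Int → Int) (k : Nat) :
    (PySem.List.pyRange 0 (k : Int) 1).foldl (fun t i => t + (g5 (i + 1) - g6 i)) (g5 0)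
      = g5 k + ∑ i ∈ Finset.range k, (g5 i - g6 i) := by
  induction k with
  | zero => simp [PySem.List.pyRange_one_eq_nil]
  | succ k ih =>
    have h : ((k : Int) + 1) = ((k + 1 : Nat) : Int) := by push_cast; ring
    rw [show ((k + 1 : Nat) : Int) = (k : Int) + 1 by push_cast; ring,
        PySem.List.pyRange_one_succ_right (by positivity), List.foldl_append, ih,
        Finset.sum_range_succ]
    simp; ring

-- index sum equals list-map sum
theorem pv_sum_idx {α : Type} (m : List α) (f : α → Int) (d : α) :
    ∑ i ∈ Finset.range m.length, f (m.getD i d) = (m.map f).sum := by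
  induction m with
  | nil => simp
  | cons a m ih =>
    rw [List.length_cons, Finset.sum_range_succ']
    simp only [List.getD_cons_succ, List.getD_cons_zero, ih, List.map_cons, List.sum_cons]
    ring

-- sum of (start-end) is the negative of sum of (end-start)
theorem pv_sum_neg (l : List (List Int)) :
    (l.map (fun job => PySem.List.pyGetD job 5 0 - PySem.List.pyGetD job 6 0)).sum
      = - (l.map (fun job => PySem.List.pyGetD job 6 0 - PySem.List.pyGetD job 5 0)).sum := by
  induction l with
  | nil => simp
  | cons a t ih =>
    simp only [List.map_cons, List.sum_cons, ih]
    ring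

-- per-machine equality, under the length precondition
theorem pv_machine (m : List (List Int)) (cmax : Int) (hne : m ≠ [])
    (hlen : ∀ job ∈ m, 7 ≤ job.length) :
    ((PySem.List.pyRange 0 ((m.length : Int) - 1) 1).foldl
        (fun t i => t + (PySem.List.pyGetD (PySem.List.pyGetD m (i + 1) []) 5 0
                         - PySem.List.pyGetD (PySem.List.pyGetD m i []) 6 0))
        (PySem.List.pyGetD (PySem.List.pyGetD m 0 []) 5 0))
      + (cmax - PySem.List.pyGetD (PySem.List.pyGetD m (-1) []) 6 0)
      = cmax - (m.map (fun job => PySem.List.pyGetD job 6 0 - PySem.List.pyGetD job 5 0)).sum := by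
  set g5 : Int → Int := fun i => PySem.List.pyGetD (PySem.List.pyGetD m i []) 5 0 with hg5
  set g6 : Int → Int := fun i => PySem.List.pyGetD (PySem.List.pyGetD m i []) 6 0 with hg6
  have hn : 1 ≤ m.length := by
    cases m with
    | nil => exact absurd rfl hne
    | cons a t => simp
  have hcast : ((m.length : Int) - 1) = ((m.length - 1 : Nat) : Int) := by
    omega
  have hfold := pv_tele g5 g6 (m.length - 1)
  rw [hcast]
  rw [show (PySem.List.pyGetD (PySem.List.pyGetD m 0 []) 5 0) = g5 0 from rfl]
  rw [show (fun t i => t + (PySem.List.pyGetD (PySem.List.pyGetD m (i + 1) []) 5 0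
                         - PySem.List.pyGetD (PySem.List.pyGetD m i []) 6 0))
        = (fun t i => t + (g5 (i + 1) - g6 i)) from rfl]
  rw [hfold]
  -- last element: m[-1] = m.getD (length-1)
  have hlast : PySem.List.pyGetD (PySem.List.pyGetD m (-1) []) 6 0 = g6 ((m.length - 1 : Nat) : Int) := by
    rw [hg6]
    have h1 : PySem.List.pyGetD m (-1) [] = m.getLast hne := PySem.List.pyGetD_neg_one m [] hne
    have h2 : PySem.List.pyGetD m ((m.length - 1 : Nat) : Int) [] = m.getD (m.length - 1) [] := by
      simp [PySem.List.pyGetD_natCast]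
    have h3 : m.getLast hne = m.getD (m.length - 1) [] := by
      rw [List.getLast_eq_getElem, List.getD_eq_getElem _ _ (by omega)]
    rw [h1, h3]
    show PySem.List.pyGetD (m.getD (m.length - 1) []) 6 0
        = PySem.List.pyGetD (PySem.List.pyGetD m ((m.length - 1 : Nat) : Int) []) 6 0
    rw [h2]
  rw [hlast]
  -- fold index sums into one range-(length) sum
  have hsplit : g5 ((m.length - 1 : Nat) : Int) + ∑ i ∈ Finset.range (m.length - 1), (g5 i - g6 i)
      + (cmax - g6 ((m.length - 1 : Nat) : Int))
      = cmax + ∑ i ∈ Finset.range m.length, (g5 i - g6 i) := by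
    have : m.length = (m.length - 1) + 1 := by omega
    rw [this, Finset.sum_range_succ]
    push_cast
    ring
  rw [hsplit]
  -- index sums to list sums
  have hswap : ∑ i ∈ Finset.range m.length, (g5 (i : Int) - g6 (i : Int))
      = ∑ i ∈ Finset.range m.length,
          (fun job => PySem.List.pyGetD job 5 0 - PySem.List.pyGetD job 6 0) (m.getD i []) := by
    apply Finset.sum_congr rfl
    intro i _
    simp [hg5, hg6, PySem.List.pyGetD_natCast]
  rw [hswap, pv_sum_idx m (fun job => PySem.List.pyGetD job 5 0 - PySem.List.pyGetD job 6 0) []]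
  rw [pv_sum_neg m]; ring

-- A's accumulator fold builds acc ++ map F
theorem pv_A_map (cmax : Int) (rbm : List (List (List Int))) : ∀ acc : List Int,
    rbm.foldl (fun standby_times machine_results =>
      if machine_results = [] then
        standby_times ++ [cmax]
      else
        standby_times ++ [((PySem.List.pyRange 0 ((machine_results.length : Int) - 1) 1).foldl
            (fun t i => t + (PySem.List.pyGetD (PySem.List.pyGetD machine_results (i + 1) []) 5 0
                             - PySem.List.pyGetD (PySem.List.pyGetD machine_results i []) 6 0))
            (PySem.List.pyGetD (PySem.List.pyGetD machine_results 0 []) 5 0))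
          + (cmax - PySem.List.pyGetD (PySem.List.pyGetD machine_results (-1) []) 6 0)]) acc
    = acc ++ rbm.map (fun machine_results =>
        if machine_results = [] then cmax
        else ((PySem.List.pyRange 0 ((machine_results.length : Int) - 1) 1).foldl
            (fun t i => t + (PySem.List.pyGetD (PySem.List.pyGetD machine_results (i + 1) []) 5 0
                             - PySem.List.pyGetD (PySem.List.pyGetD machine_results i []) 6 0))
            (PySem.List.pyGetD (PySem.List.pyGetD machine_results 0 []) 5 0))
          + (cmax - PySem.List.pyGetD (PySem.List.pyGetD machine_results (-1) []) 6 0)) := by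
  induction rbm with
  | nil => intro acc; simp
  | cons m rest ih =>
    intro acc
    simp only [List.foldl_cons, List.map_cons]
    by_cases hm : m = [] <;> simp [hm, ih, List.append_assoc]

-- ===== VERDICT (by name: the statement is the Claim_ definition above) =====
theorem calculate_standby_time_spec : Claim_equal_calculate_standby_time := by
  intro rbm cmax _hdom hpre
  unfold Spec_calculate_standby_time calculate_standby_time calculate_standby_time_alt
  rw [pv_A_map cmax rbm []]
  rw [List.nil_append]
  apply List.map_congr_left
  intro m hm
  by_cases hme : m = []
  · simp [hme]
  · rw [if_neg hme, pv_machine m cmax hme (hpre m hm)]
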